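-- pv_equiv track=rewrite | github.com/philippeAlexandre/MTG_Generator | generator/persistence.py | _normalize_mana
-- ===== SOURCE A (Python) =====
-- def _normalize_mana(mana: str):
--     """
--     Converts mana strings like '3RR' into '{3}{R}{R}'.
--     Leaves already-braced mana untouched.
--     """
--     if "{" in mana:
--         return mana  # already formatted
--
--     out = []
--     buffer = ""
--
--     for char in mana:
--         if char.isdigit():
--             buffer += char
--         else:
--             if buffer:
--                 out.append(f"{{{buffer}}}")
--                 buffer = ""
--             out.append(f"{{{char.upper()}}}")
--
--     if buffer:
--         out.append(f"{{{buffer}}}")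
--
--     return "".join(out)
-- ===== SOURCE B (Python) =====
-- def _normalize_mana(mana: str):
--     """Run-based rewrite: walk the string by index, grouping maximal digit runs
--     into one brace token and emitting one uppercased token per other char."""
--     if "{" in mana:
--         return mana
--     tokens = []
--     i = 0
--     n = len(mana)
--     while i < n:
--         if mana[i].isdigit():
--             j = i
--             while j < n and mana[j].isdigit():
--                 j += 1
--             tokens.append("{" + mana[i:j] + "}")
--             i = j
--         else:
--             tokens.append("{" + mana[i].upper() + "}")
--             i += 1
--     return "".join(tokens)
-- ===== Notes on version B (the rewrite author's own statement) =====
-- stated objective: simpler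
-- what changed: Replaces A's character fold with a carried buffer string and end-of-loop flush by an index scan over maximal digit runs that emits each complete token directly, with no pending-buffer state.
import Mathlib
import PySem

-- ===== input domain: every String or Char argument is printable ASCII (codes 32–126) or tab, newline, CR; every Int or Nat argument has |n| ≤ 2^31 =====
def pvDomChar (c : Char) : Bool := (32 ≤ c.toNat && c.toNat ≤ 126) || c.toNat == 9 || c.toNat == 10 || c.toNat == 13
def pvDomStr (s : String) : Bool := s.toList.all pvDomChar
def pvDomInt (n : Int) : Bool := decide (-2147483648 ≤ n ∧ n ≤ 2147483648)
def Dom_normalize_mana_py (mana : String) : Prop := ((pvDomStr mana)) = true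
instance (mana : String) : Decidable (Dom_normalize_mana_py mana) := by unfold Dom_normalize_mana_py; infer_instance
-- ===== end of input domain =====

-- B replaces A's carried digit-buffer + end-of-loop flush by a run-grouping scan that emits each complete token directly (objective: simpler).

-- ===== PORT A =====
-- the for-loop of A: state (out, buffer), processed character by character
def pvALoop : List Char → List (List Char) → List Char → (List (List Char) × List Char)
  | [], out, buffer => (out, buffer)
  | c :: rest, out, buffer =>
      if PySem.Chars.isdigit c then pvALoop rest out (buffer ++ [c])
      else
        let out1 := if buffer ≠ [] then out ++ [['{'] ++ buffer ++ ['}']] else out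
        pvALoop rest (out1 ++ [['{', PySem.Chars.upperChar c, '}']]) []

def normalize_mana_py (mana : String) : String :=
  if PySem.Str.isIn "{" mana then mana
  else
    let p := pvALoop mana.toList [] []
    let out := if p.2 ≠ [] then p.1 ++ [['{'] ++ p.2 ++ ['}']] else p.1
    String.ofList out.flatten   -- "".join(out)

-- ===== PORT B =====
-- B's outer while loop as recursion on the remaining characters; the inner
-- digit-run while loop (advance j over digits) is takeWhile/dropWhile
def pvBLoop : List Char → List (List Char)
  | [] => []
  | c :: rest =>
      if PySem.Chars.isdigit c then
        (('{' :: c :: rest.takeWhile PySem.Chars.isdigit) ++ ['}']) ::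
          pvBLoop (rest.dropWhile PySem.Chars.isdigit)
      else
        ['{', PySem.Chars.upperChar c, '}'] :: pvBLoop rest
termination_by cs => cs.length
decreasing_by
  · exact Nat.lt_succ_of_le (List.length_dropWhile_le _ _)
  · exact Nat.lt_succ_self _

def normalize_mana_py_alt (mana : String) : String :=
  if PySem.Str.isIn "{" mana then mana
  else String.ofList (pvBLoop mana.toList).flatten   -- "".join(tokens)

-- ===== PRECONDITION & SPEC =====
def Spec_normalize_mana_py (mana : String) (out : String) : Prop := out = normalize_mana_py_alt mana
instance (mana : String) (out : String) : Decidable (Spec_normalize_mana_py mana out) := by unfold Spec_normalize_mana_py; infer_instance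

-- ===== CLAIM (what is proved, stated in full; the proofs are below) =====
def Claim_equal_normalize_mana_py : Prop := ∀ (mana : String), Dom_normalize_mana_py mana → Spec_normalize_mana_py mana (normalize_mana_py mana)

-- ===== LEMMAS AND PROOFS =====

-- A's epilogue: flush a pending buffer into out, then concatenate all tokens
def pvAFinish (p : List (List Char) × List Char) : List Char :=
  (if p.2 ≠ [] then p.1 ++ [['{'] ++ p.2 ++ ['}']] else p.1).flatten

-- the token A emits for a pending buffer at a flush point (empty buffer: nothing)
def pvFinishTok (buffer : List Char) : List Char :=
  if buffer ≠ [] then '{' :: buffer ++ ['}'] else []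

-- abstract remainder of A's computation: pending buffer + remaining chars ↦ emitted chars
def pvG (buffer : List Char) : List Char → List Char
  | [] => pvFinishTok buffer
  | c :: rest =>
      if PySem.Chars.isdigit c then pvG (buffer ++ [c]) rest
      else pvFinishTok buffer ++ ['{', PySem.Chars.upperChar c, '}'] ++ pvG [] rest

theorem pvALoop_eq_g (cs : List Char) :
    ∀ (out : List (List Char)) (buffer : List Char),
      pvAFinish (pvALoop cs out buffer) = out.flatten ++ pvG buffer cs := by
  induction cs with
  | nil =>
      intro out buffer
      simp only [pvALoop, pvG, pvAFinish, pvFinishTok]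
      split <;> simp
  | cons c rest ih =>
      intro out buffer
      by_cases hd : PySem.Chars.isdigit c = true
      · simp only [pvALoop, pvG, hd, if_pos]
        exact ih out (buffer ++ [c])
      · simp only [pvALoop, pvG, if_neg hd]
        rw [ih]
        simp only [pvFinishTok]
        split <;> simp

theorem pvG_spec (cs : List Char) :
    (∀ (buffer : List Char), buffer ≠ [] →
      pvG buffer cs =
        '{' :: (buffer ++ cs.takeWhile PySem.Chars.isdigit) ++ ['}']
          ++ (pvBLoop (cs.dropWhile PySem.Chars.isdigit)).flatten)
    ∧ pvG [] cs = (pvBLoop cs).flatten := by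
  induction cs with
  | nil =>
      constructor
      · intro buffer hb
        simp [pvG, pvFinishTok, hb, pvBLoop]
      · simp [pvG, pvFinishTok, pvBLoop]
  | cons c rest ih =>
      by_cases hd : PySem.Chars.isdigit c = true
      · constructor
        · intro buffer hb
          simp only [pvG, List.takeWhile_cons, List.dropWhile_cons, hd, ite_true]
          rw [ih.1 (buffer ++ [c]) (by simp)]
          simp
        · simp only [pvG, if_pos hd, List.nil_append]
          rw [ih.1 [c] (by simp), pvBLoop]
          simp [hd]
      · have htok : ∀ buffer : List Char, buffer ≠ [] →
            pvG buffer (c :: rest) =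
              '{' :: (buffer ++ (c :: rest).takeWhile PySem.Chars.isdigit) ++ ['}']
                ++ (pvBLoop ((c :: rest).dropWhile PySem.Chars.isdigit)).flatten := by
          intro buffer hb
          simp only [pvG, List.takeWhile_cons, List.dropWhile_cons, hd,
            Bool.false_eq_true, ite_false]
          rw [ih.2, pvBLoop]
          simp [hd, pvFinishTok, hb]
        refine ⟨htok, ?_⟩
        rw [pvG, pvBLoop]
        simp [hd, pvFinishTok, ih.2]

-- ===== VERDICT (by name: the statement is the Claim_ definition above) =====
theorem normalize_mana_py_spec : Claim_equal_normalize_mana_py := by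
  intro mana _
  unfold Spec_normalize_mana_py normalize_mana_py normalize_mana_py_alt
  split
  · rfl
  · show String.ofList (pvAFinish (pvALoop mana.toList [] [])) =
        String.ofList (pvBLoop mana.toList).flatten
    rw [pvALoop_eq_g, (pvG_spec mana.toList).2]
    simp
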